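-- pv_equiv track=rewrite | github.com/lepture/pedantmark | pedantmark/toc.py | _outdent_item
-- ===== SOURCE A (Python) =====
-- def _outdent_item(out, parents, level):
--     parents.pop()
--     if not parents or level > parents[-1]:
--         parents.append(level)
--         return out + '</li>\n<li>'
--     elif level == parents[-1]:
--         return out + '</li>\n</ul>\n</li>\n<li>'
--     else:
--         return _outdent_item(out + '</li>\n</ul>\n', parents, level)
-- ===== SOURCE B (Python) =====
-- def _outdent_item(out, parents, level):
--     # Closed-form: count how many enclosing lists to close in one backward scan,
--     # then emit all closers at once, instead of recursing one pop at a time.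
--     # Mutates `parents` the same way A does (drops the closed levels, pushes
--     # `level` when it opens a new depth).
--     m = 0
--     for p in reversed(parents[:-1]):
--         if p > level:
--             m += 1
--         else:
--             break
--     del parents[len(parents) - 1 - m:]
--     closers = '</li>\n</ul>\n' * m
--     if not parents or level > parents[-1]:
--         parents.append(level)
--         return out + closers + '</li>\n<li>'
--     return out + closers + '</li>\n</ul>\n</li>\n<li>'
-- ===== Notes on version B (the rewrite author's own statement) =====
-- stated objective: alternative
-- what changed: Replaces the tail recursion (one pop and one string concatenation per closed level) with a single backward scan that counts the levels to close in closed form, then deletes them with one slice and emits all '</li>\n</ul>\n' closers with one string multiplication.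
import Mathlib
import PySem

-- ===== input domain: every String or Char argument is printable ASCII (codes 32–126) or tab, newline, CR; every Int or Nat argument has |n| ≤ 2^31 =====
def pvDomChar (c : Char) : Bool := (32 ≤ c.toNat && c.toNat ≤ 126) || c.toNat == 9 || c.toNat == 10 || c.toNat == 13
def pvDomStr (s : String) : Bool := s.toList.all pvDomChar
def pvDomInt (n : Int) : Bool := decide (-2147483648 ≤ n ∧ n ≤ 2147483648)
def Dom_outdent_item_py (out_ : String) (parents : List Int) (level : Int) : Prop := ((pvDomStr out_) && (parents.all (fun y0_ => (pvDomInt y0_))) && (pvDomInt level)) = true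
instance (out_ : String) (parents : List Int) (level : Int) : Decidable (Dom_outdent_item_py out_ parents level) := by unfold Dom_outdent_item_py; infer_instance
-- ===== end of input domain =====

-- B closes all pending levels in one backward scan instead of A's one-pop-per-call
-- tail recursion (objective: alternative). Python A and B both mutate `parents`
-- the same way; the equivalence proved here is about the RETURN value only.

-- ===== PORT A =====
-- A pops the last element, then either appends `level` and returns, returns,
-- or recurses on the shorter list with one closer appended to `out_`.
def outdent_item_py (out_ : String) (parents : List Int) (level : Int) : String :=
  match hm : parents with
  | [] => out_   -- Python raises IndexError on parents.pop(); excluded by Pre_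
  | _ :: _ =>
    let ps := parents.dropLast
    match ps.getLast? with
    | none => out_ ++ "</li>\n<li>"
    | some p =>
      if p < level then out_ ++ "</li>\n<li>"
      else if level = p then out_ ++ "</li>\n</ul>\n</li>\n<li>"
      else outdent_item_py (out_ ++ "</li>\n</ul>\n") ps level
termination_by parents.length
decreasing_by
  subst hm
  simp [List.length_dropLast, List.length_cons]

-- ===== PORT B =====
-- B: count trailing levels (excluding the popped one) strictly above `level`,
-- drop them with one truncation, emit all closers at once.
-- hand-port of Python's string repetition s * n (exact for n ≥ 0)
def pyStrMul (s : String) : Nat → String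
  | 0 => ""
  | n + 1 => s ++ pyStrMul s n

def outdent_item_py_alt (out_ : String) (parents : List Int) (level : Int) : String :=
  let m := ((parents.dropLast).reverse.takeWhile (fun p => p > level)).length
  let rest := parents.take (parents.length - 1 - m)
  let closers := pyStrMul "</li>\n</ul>\n" m
  match rest.getLast? with
  | none => out_ ++ closers ++ "</li>\n<li>"
  | some p =>
    if level > p then out_ ++ closers ++ "</li>\n<li>"
    else out_ ++ closers ++ "</li>\n</ul>\n</li>\n<li>"

-- ===== PRECONDITION & SPEC =====
-- Pre_ excludes only the empty `parents`, on which Python A raises IndexError at parents.pop().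
def Pre_outdent_item_py (out_ : String) (parents : List Int) (level : Int) : Prop := parents ≠ []
instance (out_ : String) (parents : List Int) (level : Int) : Decidable (Pre_outdent_item_py out_ parents level) := by unfold Pre_outdent_item_py; infer_instance
def pvWitness_outdent_item_py : String × List Int × Int := ("<ul>\n<li>", [1, 3, 5], 2)
def Spec_outdent_item_py (out_ : String) (parents : List Int) (level : Int) (out : String) : Prop := out = outdent_item_py_alt out_ parents level
instance (out_ : String) (parents : List Int) (level : Int) (out : String) : Decidable (Spec_outdent_item_py out_ parents level out) := by unfold Spec_outdent_item_py; infer_instance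

-- ===== CLAIM (what is proved, stated in full; the proofs are below) =====
def Claim_equal_outdent_item_py : Prop := ∀ (out_ : String) (parents : List Int) (level : Int), Dom_outdent_item_py out_ parents level → Pre_outdent_item_py out_ parents level → Spec_outdent_item_py out_ parents level (outdent_item_py out_ parents level)

-- ===== LEMMAS AND PROOFS =====

theorem takeWhile_rev_append (t : List Int) (p level : Int) :
    ((t ++ [p]).reverse).takeWhile (fun q => decide (q > level)) =
      if p > level then p :: (t.reverse.takeWhile (fun q => decide (q > level))) else [] := by
  have : (t ++ [p]).reverse = p :: t.reverse := by simp
  rw [this, List.takeWhile_cons]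
  by_cases h : p > level
  · rw [if_pos h, if_pos (by simpa using h)]
  · rw [if_neg h, if_neg (by simpa using h)]

theorem len_from_dropLast (a : Int) (l t : List Int) (p : Int)
    (ht : (a :: l).dropLast = t ++ [p]) : l.length = t.length + 1 := by
  have := congrArg List.length ht
  simp at this
  omega

theorem alt_m0 (out_ : String) (a level p : Int) (l t : List Int)
    (ht : (a :: l).dropLast = t ++ [p]) (h : ¬ p > level) :
    outdent_item_py_alt out_ (a :: l) level =
      if level > p then out_ ++ "</li>\n<li>" else out_ ++ "</li>\n</ul>\n</li>\n<li>" := by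
  rw [outdent_item_py_alt]
  simp only [ht, takeWhile_rev_append, if_neg h, List.length_nil, Nat.sub_zero]
  have hrest : (a :: l).take ((a :: l).length - 1) = t ++ [p] := by
    rw [← List.dropLast_eq_take, ht]
  simp only [hrest]
  simp [pyStrMul]

theorem alt_step (out_ : String) (a level p : Int) (l t : List Int)
    (ht : (a :: l).dropLast = t ++ [p]) (h : p > level) :
    outdent_item_py_alt out_ (a :: l) level =
      outdent_item_py_alt (out_ ++ "</li>\n</ul>\n") (t ++ [p]) level := by
  rw [outdent_item_py_alt, outdent_item_py_alt]
  have hlen := len_from_dropLast a l t p ht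
  have hdl : (t ++ [p]).dropLast = t := by simp
  simp only [ht, hdl, takeWhile_rev_append, if_pos h, List.length_cons, List.length_append,
    List.length_nil]
  generalize hX : (List.takeWhile (fun q => decide (q > level)) t.reverse).length = X
  have hidx1 : l.length + 1 - 1 - (X + 1) = t.length - X := by omega
  have hidx2 : t.length + 1 - 1 - X = t.length - X := by omega
  rw [hidx1, hidx2]
  have htake : List.take (t.length - X) (a :: l) = List.take (t.length - X) (t ++ [p]) := by
    have h1 : t ++ [p] = (a :: l).take ((a :: l).length - 1) := by
      rw [← List.dropLast_eq_take, ht]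
    rw [h1, List.take_take]
    congr 1
    simp
    omega
  rw [htake]
  have hmul : pyStrMul "</li>\n</ul>\n" (X + 1)
      = "</li>\n</ul>\n" ++ pyStrMul "</li>\n</ul>\n" X := rfl
  rw [hmul]
  cases hg : (List.take (t.length - X) (t ++ [p])).getLast? with
  | none => simp [String.append_assoc]
  | some q => simp only []; split_ifs <;> simp [String.append_assoc]

theorem outdent_key_n : ∀ (n : Nat) (parents : List Int), parents.length ≤ n →
    ∀ (out_ : String) (level : Int), parents ≠ [] →
    outdent_item_py out_ parents level = outdent_item_py_alt out_ parents level := by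
  intro n
  induction n with
  | zero =>
    intro parents h _ _ hne
    cases parents with
    | nil => exact absurd rfl hne
    | cons a l => simp at h
  | succ n ih =>
    intro parents hlen out_ level hne
    obtain ⟨a, l, rfl⟩ := List.exists_cons_of_ne_nil hne
    rw [outdent_item_py]
    cases hps : (a :: l).dropLast.getLast? with
    | none =>
      have hl : l = [] := by
        have := congrArg List.length (List.getLast?_eq_none_iff.mp hps)
        simp at this; exact this
      subst hl
      simp [outdent_item_py_alt, pyStrMul]
    | some p =>
      obtain ⟨t, ht⟩ := List.getLast?_eq_some_iff.mp hps
      by_cases h1 : p < level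
      · simp only [if_pos h1]
        rw [alt_m0 out_ a level p l t ht (by omega), if_pos h1]
      · by_cases h2 : level = p
        · simp only [if_neg h1, if_pos h2]
          rw [alt_m0 out_ a level p l t ht (by omega), if_neg (by omega)]
        · simp only [if_neg h1, if_neg h2]
          have hgt : p > level := by omega
          rw [alt_step out_ a level p l t ht hgt]
          have hne2 : t ++ [p] ≠ [] := by simp
          have hlen2 : (t ++ [p]).length ≤ n := by
            have := len_from_dropLast a l t p ht
            simp at hlen ⊢
            omega
          rw [← ht]
          rw [ih (a :: l).dropLast (by rw [ht]; exact hlen2) (out_ ++ "</li>\n</ul>\n") level (by rw [ht]; exact hne2)]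

theorem outdent_key : ∀ (parents : List Int) (out_ : String) (level : Int),
    parents ≠ [] → outdent_item_py out_ parents level = outdent_item_py_alt out_ parents level :=
  fun parents out_ level h => outdent_key_n parents.length parents le_rfl out_ level h

-- ===== VERDICT (by name: the statement is the Claim_ definition above) =====
theorem outdent_item_py_spec : Claim_equal_outdent_item_py := by
  intro out_ parents level _ hpre
  exact outdent_key parents out_ level hpre
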